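-- pv_equiv track=rewrite | github.com/cj1128/advent-of-code | 2017/python/03-spiral-memory/main.py | squre_coor_seq
-- ===== SOURCE A (Python) =====
-- def squre_coor_seq(num):
--   if num <= 0:
--     return
--
--   x = 0
--   y = 0
--   r = 1
--   direction = "right"
--
--   for _ in range(num):
--     yield (x, y)
--
--     if direction == "right":
--       x += 1
--     elif direction == "up":
--       y += 1
--     elif direction == "left":
--       x -= 1
--     elif direction == "down":
--       y -= 1
--
--     if direction == "right" and x > r:
--       x -= 1
--       y += 1
--       direction = "up"
--       continue
--
--     if direction == "up" and y > r:
--       y -= 1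
--       x -= 1
--       direction = "left"
--       continue
--
--     if direction == "left" and x < -r:
--       x += 1
--       y -= 1
--       direction = "down"
--       continue
--
--     if direction == "down" and y < -r:
--       y += 1
--       x += 1
--       r += 1
--       direction = "right"
--       continue
-- ===== SOURCE B (Python) =====
-- def squre_coor_seq(num):
--   # Drive the walk by the side-length schedule: each segment length is used twice, then incremented.
--   if num <= 0:
--     return
--   yield (0, 0)
--   count = 1
--   x = y = 0
--   deltas = [(1, 0), (0, 1), (-1, 0), (0, -1)]
--   d = 0
--   length = 1
--   while count < num:
--     dx, dy = deltas[d]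
--     for _ in range(min(length, num - count)):
--       x += dx
--       y += dy
--       yield (x, y)
--       count += 1
--     if d % 2 == 1:
--       length += 1
--     d = (d + 1) % 4
-- ===== Notes on version B (the rewrite author's own statement) =====
-- stated objective: alternative
-- what changed: B drives the spiral walk by the side-length schedule (each segment length used twice, then incremented): a nested loop steps along a cycling unit-vector direction for each segment, stopping the instant num points are emitted, replacing A's per-step radius comparison with back-up-and-turn state corrections.
import Mathlib
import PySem

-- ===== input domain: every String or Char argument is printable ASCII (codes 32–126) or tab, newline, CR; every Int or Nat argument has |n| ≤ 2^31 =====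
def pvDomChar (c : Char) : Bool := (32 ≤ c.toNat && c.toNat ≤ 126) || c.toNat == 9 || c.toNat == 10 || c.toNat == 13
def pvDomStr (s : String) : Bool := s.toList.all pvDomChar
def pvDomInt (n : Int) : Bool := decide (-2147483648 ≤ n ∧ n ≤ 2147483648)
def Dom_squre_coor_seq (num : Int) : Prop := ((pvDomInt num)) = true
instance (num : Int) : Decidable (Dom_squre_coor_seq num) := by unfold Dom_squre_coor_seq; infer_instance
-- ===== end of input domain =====

-- B replaces A's per-step radius comparison and back-up-and-turn correction by the
-- side-length schedule (each length used twice, then grown by one) over cycling unit-vector directions (alternative decomposition).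

-- ===== PORT A =====
-- one iteration of A's loop body (after the yield): move, then the four turn checks
def pvAStep (x y r : Int) (d : String) : Int × Int × Int × String :=
  let x := if d = "right" then x + 1 else x
  let y := if d = "up" then y + 1 else y
  let x := if d = "left" then x - 1 else x
  let y := if d = "down" then y - 1 else y
  if d = "right" ∧ x > r then (x - 1, y + 1, r, "up")
  else if d = "up" ∧ y > r then (x - 1, y - 1, r, "left")
  else if d = "left" ∧ x < -r then (x + 1, y - 1, r, "down")
  else if d = "down" ∧ y < -r then (x + 1, y + 1, r + 1, "right")
  else (x, y, r, d)

-- 'for _ in range(num): yield (x, y); <step>'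
def pvALoop : Nat → Int → Int → Int → String → List (Int × Int)
  | 0, _, _, _, _ => []
  | n + 1, x, y, r, d =>
    let st := pvAStep x y r d
    (x, y) :: pvALoop n st.1 st.2.1 st.2.2.1 st.2.2.2

def squre_coor_seq (num : Int) : List (Int × Int) :=
  if num ≤ 0 then [] else pvALoop num.toNat 0 0 1 "right"

-- ===== PORT B =====
-- deltas[d]
def pvDelta (d : Nat) : Int × Int :=
  if d = 0 then (1, 0) else if d = 1 then (0, 1) else if d = 2 then (-1, 0) else (0, -1)

-- B's inner 'for _ in range(k)': take k steps with delta (dx,dy), yielding each new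
-- position; returns the yielded list together with the final position
def pvBSeg : Nat → Int → Int → Int → Int → List (Int × Int) × Int × Int
  | 0, x, y, _, _ => ([], x, y)
  | k + 1, x, y, dx, dy =>
    let x := x + dx
    let y := y + dy
    let rest := pvBSeg k x y dx dy
    ((x, y) :: rest.1, rest.2)

-- B's outer 'while count < num' loop; rem = num - count.  B stores the segment length
-- as lenM1 = length - 1 (length ≥ 1 always holds in Source B); this makes the fuel
-- argument rem strictly decrease, and the computation is step for step Source B's.
def pvBWalk (rem : Nat) (x y : Int) (d lenM1 : Nat) : List (Int × Int) :=
  if rem = 0 then []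
  else
    (pvBSeg (min (lenM1 + 1) rem) x y (pvDelta d).1 (pvDelta d).2).1 ++
      pvBWalk (rem - min (lenM1 + 1) rem)
        (pvBSeg (min (lenM1 + 1) rem) x y (pvDelta d).1 (pvDelta d).2).2.1
        (pvBSeg (min (lenM1 + 1) rem) x y (pvDelta d).1 (pvDelta d).2).2.2
        ((d + 1) % 4) (if d % 2 = 1 then lenM1 + 1 else lenM1)
termination_by rem
decreasing_by omega

def squre_coor_seq_alt (num : Int) : List (Int × Int) :=
  if num ≤ 0 then [] else (0, 0) :: pvBWalk (num.toNat - 1) 0 0 0 0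

-- ===== PRECONDITION & SPEC =====
def Spec_squre_coor_seq (num : Int) (out : List (Int × Int)) : Prop := out = squre_coor_seq_alt num
instance (num : Int) (out : List (Int × Int)) : Decidable (Spec_squre_coor_seq num out) := by unfold Spec_squre_coor_seq; infer_instance

-- ===== CLAIM (what is proved, stated in full; the proofs are below) =====
def Claim_equal_squre_coor_seq : Prop := ∀ (num : Int), Dom_squre_coor_seq num → Spec_squre_coor_seq num (squre_coor_seq num)

-- ===== LEMMAS AND PROOFS =====

-- flattened single-step view of B's walk: s = steps remaining in the current segment
def pvFlat : Nat → Int → Int → Nat → Nat → Nat → List (Int × Int)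
  | 0, _, _, _, _, _ => []
  | n + 1, x, y, d, lenM1, s =>
    let dxy := pvDelta d
    let x := x + dxy.1
    let y := y + dxy.2
    (x, y) ::
      (if s ≤ 1 then
        let lenM1' := if d % 2 = 1 then lenM1 + 1 else lenM1
        pvFlat n x y ((d + 1) % 4) lenM1' (lenM1' + 1)
      else pvFlat n x y d lenM1 (s - 1))

-- one segment of pvFlat is a pvBSeg prefix followed by pvFlat on a fresh segment
lemma pvFlat_seg : ∀ (s rem : Nat) (x y : Int) (d lenM1 : Nat),
    pvFlat rem x y d lenM1 (s + 1) =
      (pvBSeg (min (s + 1) rem) x y (pvDelta d).1 (pvDelta d).2).1 ++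
        pvFlat (rem - min (s + 1) rem)
          (pvBSeg (min (s + 1) rem) x y (pvDelta d).1 (pvDelta d).2).2.1
          (pvBSeg (min (s + 1) rem) x y (pvDelta d).1 (pvDelta d).2).2.2
          ((d + 1) % 4) (if d % 2 = 1 then lenM1 + 1 else lenM1)
          ((if d % 2 = 1 then lenM1 + 1 else lenM1) + 1) := by
  intro s
  induction s with
  | zero =>
    intro rem x y d lenM1
    cases rem with
    | zero => simp [pvFlat, pvBSeg]
    | succ m => simp [pvFlat, pvBSeg]
  | succ s ih =>
    intro rem x y d lenM1
    cases rem with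
    | zero => simp [pvFlat, pvBSeg]
    | succ m =>
      have hmin : min (s + 1 + 1) (m + 1) = min (s + 1) m + 1 := by omega
      have hsub : m + 1 - (min (s + 1) m + 1) = m - min (s + 1) m := by omega
      simp only [pvFlat, hmin, pvBSeg]
      have hs : ¬ (s + 1 + 1 ≤ 1) := by omega
      simp only [if_neg hs, Nat.add_sub_cancel, hsub]
      rw [ih m (x + (pvDelta d).1) (y + (pvDelta d).2) d lenM1]
      simp

-- B's segmented walk equals the flattened walk started on a fresh segment
lemma pvBWalk_eq_flat : ∀ (rem : Nat) (x y : Int) (d lenM1 : Nat),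
    pvBWalk rem x y d lenM1 = pvFlat rem x y d lenM1 (lenM1 + 1) := by
  intro rem
  induction rem using Nat.strong_induction_on with
  | _ rem ih =>
    intro x y d lenM1
    cases rem with
    | zero => simp [pvBWalk, pvFlat]
    | succ m =>
      rw [pvBWalk, if_neg (Nat.succ_ne_zero m)]
      rw [pvFlat_seg lenM1 (m + 1) x y d lenM1]
      have hk : 1 ≤ min (lenM1 + 1) (m + 1) := by omega
      rw [ih (m + 1 - min (lenM1 + 1) (m + 1)) (by omega)]

-- the invariant tying A's loop state (x, y, r, direction) to the flat state (dIdx, lenM1, s)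
def pvRel (x y r : Int) (d : String) (dIdx lenM1 s : Nat) : Prop :=
  (d = "right" ∧ y = 1 - r ∧ 1 - r ≤ x ∧ x ≤ r ∧ 1 ≤ r ∧ (lenM1 : Int) = 2*r - 2 ∧
     ((x < r ∧ dIdx = 0 ∧ (s : Int) = r - x) ∨ (x = r ∧ dIdx = 1 ∧ (s : Int) = 2*r - 1)))
  ∨ (d = "up" ∧ x = r ∧ 1 - r ≤ y ∧ y ≤ r ∧ 1 ≤ r ∧
     ((y < r ∧ dIdx = 1 ∧ (lenM1 : Int) = 2*r - 2 ∧ (s : Int) = r - y) ∨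
      (y = r ∧ dIdx = 2 ∧ (lenM1 : Int) = 2*r - 1 ∧ (s : Int) = 2*r)))
  ∨ (d = "left" ∧ y = r ∧ -r ≤ x ∧ x ≤ r - 1 ∧ 1 ≤ r ∧ (lenM1 : Int) = 2*r - 1 ∧
     ((-r < x ∧ dIdx = 2 ∧ (s : Int) = x + r) ∨ (x = -r ∧ dIdx = 3 ∧ (s : Int) = 2*r)))
  ∨ (d = "down" ∧ x = -r ∧ -r ≤ y ∧ y ≤ r - 1 ∧ 1 ≤ r ∧
     ((-r < y ∧ dIdx = 3 ∧ (lenM1 : Int) = 2*r - 1 ∧ (s : Int) = y + r) ∨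
      (y = -r ∧ dIdx = 0 ∧ (lenM1 : Int) = 2*r ∧ (s : Int) = 2*r + 1)))

-- A's yielding loop equals "emit current position, then flat-walk", under the invariant
lemma pvALoop_eq_flat : ∀ (n : Nat) (x y r : Int) (d : String) (dIdx lenM1 s : Nat),
    pvRel x y r d dIdx lenM1 s →
    pvALoop (n + 1) x y r d = (x, y) :: pvFlat n x y dIdx lenM1 s := by
  intro n
  induction n with
  | zero => intro x y r d dIdx lenM1 s _; simp [pvALoop, pvFlat]
  | succ n ih =>
    intro x y r d dIdx lenM1 s hrel
    rw [pvALoop]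
    rcases hrel with ⟨hd, hy, hx1, hx2, hr, hlen, hcase⟩ |
      ⟨hd, hx, hy1, hy2, hr, hcase⟩ | ⟨hd, hy, hx1, hx2, hr, hlen, hcase⟩ |
      ⟨hd, hx, hy1, hy2, hr, hcase⟩
    · -- direction = "right"
      subst hd
      rcases hcase with ⟨hlt, hdI, hs⟩ | ⟨heq, hdI, hs⟩
      · -- mid-segment: move right
        subst hdI
        have hnogt : ¬ (x + 1 > r) := by omega
        have hstep : pvAStep x y r "right" = (x + 1, y, r, "right") := by
          simp [pvAStep, hnogt]
        rw [hstep]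
        by_cases hend : x + 1 < r
        · -- still mid-segment
          rw [ih (x+1) y r "right" 0 lenM1 (s-1)
            (Or.inl ⟨rfl, hy, by omega, by omega, hr, hlen, Or.inl ⟨hend, rfl, by omega⟩⟩)]
          have hs1 : ¬ (s ≤ 1) := by omega
          simp [pvFlat, pvDelta, if_neg hs1]
        · -- this step reaches the corner: next A-state is right-at-end
          have hxe : x + 1 = r := by omega
          rw [ih (x+1) y r "right" 1 lenM1 (2*r-1).toNat
            (Or.inl ⟨rfl, hy, by omega, by omega, hr, hlen, Or.inr ⟨hxe, rfl, by omega⟩⟩)]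
          have hs1 : s ≤ 1 := by omega
          have hL : lenM1 + 1 = (2*r-1).toNat := by omega
          simp [pvFlat, pvDelta, if_pos hs1, hL, sub_eq_add_neg]
      · -- at the corner: A's overshoot-and-turn = first up move
        subst hdI heq
        have hgt : x + 1 > x := by omega
        have hstep : pvAStep x y x "right" = (x, y + 1, x, "up") := by
          simp [pvAStep, hgt]
        rw [hstep]
        by_cases hend : y + 1 < x
        · rw [ih x (y+1) x "up" 1 lenM1 (s-1)
            (Or.inr (Or.inl ⟨rfl, rfl, by omega, by omega, hr, Or.inl ⟨hend, rfl, by omega, by omega⟩⟩))]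
          have hs1 : ¬ (s ≤ 1) := by omega
          simp [pvFlat, pvDelta, if_neg hs1]
        · -- r = 1 corner: segment of length 1 ends immediately
          have hye : y + 1 = x := by omega
          rw [ih x (y+1) x "up" 2 (lenM1+1) (2*x).toNat
            (Or.inr (Or.inl ⟨rfl, rfl, by omega, by omega, hr, Or.inr ⟨hye, rfl, by omega, by omega⟩⟩))]
          have hs1 : s ≤ 1 := by omega
          have hL : lenM1 + 1 + 1 = (2*x).toNat := by omega
          simp [pvFlat, pvDelta, if_pos hs1, hL]
    · -- direction = "up"
      subst hd
      rcases hcase with ⟨hlt, hdI, hlen, hs⟩ | ⟨heq, hdI, hlen, hs⟩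
      · subst hdI
        have hnogt : ¬ (y + 1 > r) := by omega
        have hstep : pvAStep x y r "up" = (x, y + 1, r, "up") := by
          simp [pvAStep, hnogt]
        rw [hstep]
        by_cases hend : y + 1 < r
        · rw [ih x (y+1) r "up" 1 lenM1 (s-1)
            (Or.inr (Or.inl ⟨rfl, hx, by omega, by omega, hr, Or.inl ⟨hend, rfl, hlen, by omega⟩⟩))]
          have hs1 : ¬ (s ≤ 1) := by omega
          simp [pvFlat, pvDelta, if_neg hs1]
        · have hye : y + 1 = r := by omega
          rw [ih x (y+1) r "up" 2 (lenM1+1) (2*r).toNat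
            (Or.inr (Or.inl ⟨rfl, hx, by omega, by omega, hr, Or.inr ⟨hye, rfl, by omega, by omega⟩⟩))]
          have hs1 : s ≤ 1 := by omega
          have hL : lenM1 + 1 + 1 = (2*r).toNat := by omega
          simp [pvFlat, pvDelta, if_pos hs1, hL]
      · subst hdI heq
        have hgt : y + 1 > y := by omega
        have hstep : pvAStep x y y "up" = (x - 1, y, y, "left") := by
          simp [pvAStep, hgt]
        rw [hstep]
        have hend : -y < x - 1 := by omega
        rw [ih (x-1) y y "left" 2 lenM1 (s-1)
          (Or.inr (Or.inr (Or.inl ⟨rfl, rfl, by omega, by omega, hr, hlen, Or.inl ⟨hend, rfl, by omega⟩⟩)))]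
        have hs1 : ¬ (s ≤ 1) := by omega
        simp [pvFlat, pvDelta, if_neg hs1, sub_eq_add_neg]
    · -- direction = "left"
      subst hd
      rcases hcase with ⟨hlt, hdI, hs⟩ | ⟨heq, hdI, hs⟩
      · subst hdI
        have hnolt : ¬ (x - 1 < -r) := by omega
        have hstep : pvAStep x y r "left" = (x - 1, y, r, "left") := by
          simp [pvAStep, hnolt]
        rw [hstep]
        by_cases hend : -r < x - 1
        · rw [ih (x-1) y r "left" 2 lenM1 (s-1)
            (Or.inr (Or.inr (Or.inl ⟨rfl, hy, by omega, by omega, hr, hlen, Or.inl ⟨hend, rfl, by omega⟩⟩)))]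
          have hs1 : ¬ (s ≤ 1) := by omega
          simp [pvFlat, pvDelta, if_neg hs1, sub_eq_add_neg]
        · have hxe : x - 1 = -r := by omega
          rw [ih (x-1) y r "left" 3 lenM1 (2*r).toNat
            (Or.inr (Or.inr (Or.inl ⟨rfl, hy, by omega, by omega, hr, hlen, Or.inr ⟨hxe, rfl, by omega⟩⟩)))]
          have hs1 : s ≤ 1 := by omega
          have hL : lenM1 + 1 = (2*r).toNat := by omega
          simp [pvFlat, pvDelta, if_pos hs1, hL, sub_eq_add_neg]
      · subst hdI heq
        have hstep : pvAStep (-r) y r "left" = (-r, y - 1, r, "down") := by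
          simp [pvAStep]
        rw [hstep]
        have hend : -r < y - 1 := by omega
        rw [ih (-r) (y-1) r "down" 3 lenM1 (s-1)
          (Or.inr (Or.inr (Or.inr ⟨rfl, rfl, by omega, by omega, hr, Or.inl ⟨hend, rfl, by omega, by omega⟩⟩)))]
        have hs1 : ¬ (s ≤ 1) := by omega
        simp [pvFlat, pvDelta, if_neg hs1, sub_eq_add_neg]
    · -- direction = "down"
      subst hd
      rcases hcase with ⟨hlt, hdI, hlen, hs⟩ | ⟨heq, hdI, hlen, hs⟩
      · subst hdI
        have hnolt : ¬ (y - 1 < -r) := by omega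
        have hstep : pvAStep x y r "down" = (x, y - 1, r, "down") := by
          simp [pvAStep, hnolt]
        rw [hstep]
        by_cases hend : -r < y - 1
        · rw [ih x (y-1) r "down" 3 lenM1 (s-1)
            (Or.inr (Or.inr (Or.inr ⟨rfl, hx, by omega, by omega, hr, Or.inl ⟨hend, rfl, hlen, by omega⟩⟩)))]
          have hs1 : ¬ (s ≤ 1) := by omega
          simp [pvFlat, pvDelta, if_neg hs1, sub_eq_add_neg]
        · have hye : y - 1 = -r := by omega
          rw [ih x (y-1) r "down" 0 (lenM1+1) (2*r+1).toNat
            (Or.inr (Or.inr (Or.inr ⟨rfl, hx, by omega, by omega, hr, Or.inr ⟨hye, rfl, by omega, by omega⟩⟩)))]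
          have hs1 : s ≤ 1 := by omega
          have hL : lenM1 + 1 + 1 = (2*r+1).toNat := by omega
          simp [pvFlat, pvDelta, if_pos hs1, hL, sub_eq_add_neg]
      · subst hdI hx heq
        have hstep : pvAStep (-r) (-r) r "down" = (-r + 1, -r, r + 1, "right") := by
          simp [pvAStep]
        rw [hstep]
        have hend : -r + 1 < r + 1 := by omega
        rw [ih (-r+1) (-r) (r+1) "right" 0 lenM1 (s-1)
          (Or.inl ⟨rfl, by omega, by omega, by omega, by omega, by omega, Or.inl ⟨hend, rfl, by omega⟩⟩)]
        have hs1 : ¬ (s ≤ 1) := by omega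
        simp [pvFlat, pvDelta, if_neg hs1]

-- ===== VERDICT (by name: the statement is the Claim_ definition above) =====
theorem squre_coor_seq_spec : Claim_equal_squre_coor_seq := by
  intro num _
  unfold Spec_squre_coor_seq squre_coor_seq squre_coor_seq_alt
  by_cases h : num ≤ 0
  · simp [h]
  · have ht : num.toNat = (num.toNat - 1) + 1 := by omega
    rw [if_neg h, if_neg h, ht,
      pvALoop_eq_flat (num.toNat - 1) 0 0 1 "right" 0 0 1
        (Or.inl ⟨rfl, by omega, by omega, by omega, by omega, by omega, Or.inl ⟨by omega, rfl, by omega⟩⟩),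
      pvBWalk_eq_flat]
    simp
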